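-- pv_equiv track=rewrite | github.com/apparentorder/aoc | 2022/day10.py | parse
-- ===== SOURCE A (Python) =====
-- def parse(input):
-- 	cycles = []
-- 	x = 1
--
-- 	for parts in [line.split() for line in input]:
-- 		cycles += [x]
--
-- 		if parts[0] == "addx":
-- 			cycles += [x] # again
-- 			x += int(parts[1])
--
-- 	return cycles
-- ===== SOURCE B (Python) =====
-- def parse(input):
--     # Pass 1: build a flat per-cycle delta table (0 for each cycle; the addx
--     # amount lands on the cycle after which it takes effect).
--     deltas = []
--     for line in input:
--         parts = line.split()
--         if parts[0] == "addx":
--             deltas.append(0)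
--             deltas.append(int(parts[1]))
--         else:
--             deltas.append(0)
--     # Pass 2: prefix-sum scan over the deltas, starting from X = 1.
--     cycles = []
--     x = 1
--     for d in deltas:
--         cycles.append(x)
--         x += d
--     return cycles
-- ===== Notes on version B (the rewrite author's own statement) =====
-- stated objective: alternative
-- what changed: B replaces A's interleaved append-and-update loop by two passes: first it builds a flat per-cycle delta table (0 per cycle, with the addx amount as the delta of the cycle it completes), then a prefix-sum scan over that table yields the cycle values; list.append instead of A's 'cycles += [x]' is the constant-factor gain.
import Mathlib
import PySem

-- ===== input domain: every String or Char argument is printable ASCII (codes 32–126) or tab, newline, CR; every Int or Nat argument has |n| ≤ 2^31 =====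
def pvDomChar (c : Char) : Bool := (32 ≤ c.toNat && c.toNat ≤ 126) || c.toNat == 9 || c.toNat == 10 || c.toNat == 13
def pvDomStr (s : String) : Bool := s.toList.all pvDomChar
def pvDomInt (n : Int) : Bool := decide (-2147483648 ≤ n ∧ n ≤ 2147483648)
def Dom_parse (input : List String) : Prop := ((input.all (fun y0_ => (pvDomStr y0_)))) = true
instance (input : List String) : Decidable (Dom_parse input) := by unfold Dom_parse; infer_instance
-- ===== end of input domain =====

-- B builds a flat per-cycle delta table in one pass, then a prefix-sum scan over it; return value only, no observable mutation.
-- ===== PORT A =====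
-- A's loop body: append x per cycle, update x on addx.
def parseStepA (st : List Int × Int) (line : String) : List Int × Int :=
  let parts := PySem.Str.split₀ line
  let cycles := st.1 ++ [st.2]
  if parts.getD 0 "" = "addx" then
    (cycles ++ [st.2], st.2 + ((PySem.Int.ofStr? (parts.getD 1 "")).getD 0))
  else
    (cycles, st.2)

def parse (input : List String) : List Int :=
  (input.foldl parseStepA ([], 1)).1

-- ===== PORT B =====
-- Pass 1 of Source B: one loop step of building the per-cycle delta table.
def deltaStep (ds : List Int) (line : String) : List Int :=
  let parts := PySem.Str.split₀ line
  if parts.getD 0 "" = "addx" then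
    ds ++ [0, ((PySem.Int.ofStr? (parts.getD 1 "")).getD 0)]
  else
    ds ++ [0]

def parseDeltas (input : List String) : List Int :=
  input.foldl deltaStep []

-- Pass 2 of Source B: one step of the prefix-sum scan.
def scanStep (st : List Int × Int) (d : Int) : List Int × Int :=
  (st.1 ++ [st.2], st.2 + d)

def parse_alt (input : List String) : List Int :=
  ((parseDeltas input).foldl scanStep ([], 1)).1

-- ===== PRECONDITION & SPEC =====
-- Pre_ excludes exactly the inputs where Python A raises: a line whose split() is
-- empty (IndexError on parts[0]) or an addx line with no second word or a second
-- word int() rejects (IndexError/ValueError).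
def Pre_parse (input : List String) : Prop :=
  ∀ line ∈ input,
    PySem.Str.split₀ line ≠ [] ∧
    ((PySem.Str.split₀ line).getD 0 "" = "addx" →
      1 < (PySem.Str.split₀ line).length ∧
      (PySem.Int.ofStr? ((PySem.Str.split₀ line).getD 1 "")).isSome)
instance (input : List String) : Decidable (Pre_parse input) := by unfold Pre_parse; infer_instance
def pvWitness_parse : List String := ["noop", "addx 3", "addx -5"]

def Spec_parse (input : List String) (out : List Int) : Prop := out = parse_alt input
instance (input : List String) (out : List Int) : Decidable (Spec_parse input out) := by unfold Spec_parse; infer_instance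

-- ===== CLAIM (what is proved, stated in full; the proofs are below) =====
def Claim_equal_parse : Prop := ∀ (input : List String), Dom_parse input → Pre_parse input → Spec_parse input (parse input)

-- ===== LEMMAS AND PROOFS =====

-- ===== LEMMAS AND PROOFS =====
theorem deltaStep_acc (ds : List Int) (line : String) :
    deltaStep ds line = ds ++ deltaStep [] line := by
  unfold deltaStep
  dsimp only
  split_ifs with h <;> simp

-- B's pass-1 fold with accumulator ds equals ds ++ (pass 1 from []).
theorem parseDeltas_acc (input : List String) (ds : List Int) :
    input.foldl deltaStep ds = ds ++ parseDeltas input := by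
  induction input generalizing ds with
  | nil => simp [parseDeltas]
  | cons line rest ih =>
    simp only [List.foldl_cons, parseDeltas]
    rw [deltaStep_acc, ih, ih (deltaStep [] line), List.append_assoc]

theorem parseDeltas_cons (line : String) (rest : List String) :
    parseDeltas (line :: rest) = deltaStep [] line ++ parseDeltas rest := by
  rw [parseDeltas, List.foldl_cons, parseDeltas_acc]

-- One A-step equals scanning the deltas that line contributes.
theorem stepA_eq_scan (st : List Int × Int) (line : String) :
    parseStepA st line = (deltaStep [] line).foldl scanStep st := by
  unfold parseStepA deltaStep scanStep
  dsimp only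
  split_ifs with h <;> simp

-- A's fold from any state equals B's scan over B's delta table from that state.
theorem parse_fold_eq (input : List String) (st : List Int × Int) :
    input.foldl parseStepA st = (parseDeltas input).foldl scanStep st := by
  induction input generalizing st with
  | nil => simp [parseDeltas]
  | cons line rest ih =>
    rw [List.foldl_cons, ih, parseDeltas_cons, List.foldl_append, stepA_eq_scan]

theorem parse_eq_alt (input : List String) : parse input = parse_alt input := by
  unfold parse parse_alt
  rw [parse_fold_eq]

-- ===== VERDICT (by name: the statement is the Claim_ definition above) =====
theorem parse_spec : Claim_equal_parse := by
  intro input _ _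
  unfold Spec_parse
  exact parse_eq_alt input
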